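-- pv_equiv track=rewrite | github.com/pentagonalize/random_roadtrip | randomRoads.py | remove_loops
-- ===== SOURCE A (Python) =====
-- def remove_loops(path):
--     result = path
--     start = 0
--     end = 0
--     length = len(result)
--     while start <= length:
--         while end < length:
--             if result[start] == result[end]:
--                 result = result[0:start] + result[end:]
--                 length -= (end-start)
--                 end -= (end-start)
--             end += 1
--         start += 1
--         end = start
--     return result
-- ===== SOURCE B (Python) =====
-- def remove_loops(path):
--     out = []
--     idx = {}  # value -> its index in out (out is always loop-free)
--     for x in path:
--         if x in idx:
--             i = idx[x]
--             for y in out[i:]: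
--                 del idx[y]
--             out = out[:i]
--         idx[x] = len(out)
--         out.append(x)
--     return out
-- ===== Notes on version B (the rewrite author's own statement) =====
-- stated objective: faster
-- what changed: A repeatedly rescans and splices the whole list in nested while loops restarting from every position; B does one left-to-right pass keeping a value-to-index dict over the loop-free prefix and truncating it when a value repeats.
import Mathlib
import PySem

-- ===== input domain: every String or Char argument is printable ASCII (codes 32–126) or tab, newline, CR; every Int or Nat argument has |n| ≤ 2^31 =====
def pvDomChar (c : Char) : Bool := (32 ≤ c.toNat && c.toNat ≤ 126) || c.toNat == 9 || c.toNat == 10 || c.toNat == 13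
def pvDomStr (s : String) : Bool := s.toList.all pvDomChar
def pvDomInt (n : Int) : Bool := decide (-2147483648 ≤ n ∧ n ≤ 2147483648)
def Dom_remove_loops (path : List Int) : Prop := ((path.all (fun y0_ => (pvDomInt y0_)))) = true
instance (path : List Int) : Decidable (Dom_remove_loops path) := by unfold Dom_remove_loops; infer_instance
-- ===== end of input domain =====

-- B replaces A's restart-scanning nested while loops by a single left-to-right pass with a
-- value→index dictionary that truncates the output on a repeat (objective: faster).


-- ===== PORT A =====
-- Python's nested while loops, transliterated with a structural fuel counter as the totality
-- guard (the inner loop advances `length - end` by exactly 1 per step, so `r.length` fuel always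
-- suffices; the outer loop runs at most len(path)+1 times): on a match the inner loop does
-- `result = result[0:start] + result[end:]` and `end -= (end-start); end += 1` (= start+1 since
-- start ≤ end), otherwise `end += 1`.  `length` always equals len(result), so it is read off `r`;
-- all reachable index accesses are in range, so `getD _ 0` is exact here.
def aInner (fuel : Nat) (r : List Int) (s e : Nat) : List Int × Nat :=
  match fuel with
  | 0 => (r, e)
  | fuel + 1 =>
      if e < r.length then
        if r.getD s 0 = r.getD e 0 then
          aInner fuel (r.take s ++ r.drop e) s (s + 1)
        else
          aInner fuel r s (e + 1)
      else (r, e)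

-- Python's outer `while start <= length` loop (`end = start` on entry to the inner loop)
def aOuter (fuel : Nat) (r : List Int) (s : Nat) : List Int :=
  match fuel with
  | 0 => r
  | fuel + 1 =>
      if s ≤ r.length then aOuter fuel (aInner r.length r s s).1 (s + 1) else r

def remove_loops (path : List Int) : List Int := aOuter (path.length + 1) path 0

-- ===== PORT B =====
-- loop body of Source B's single `for x in path` pass; st = (out, idx)
def bStep (st : List Int × PySem.Dict Int Int) (x : Int) : List Int × PySem.Dict Int Int :=
  match st.2.get? x with
  | some i =>
      let idx2 := (PySem.List.slice st.1 (some i) none).foldl (fun d y => d.erase y) st.2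
      let out2 := PySem.List.slice st.1 none (some i)
      (out2 ++ [x], idx2.insert x (PySem.List.len out2))
  | none => (st.1 ++ [x], st.2.insert x (PySem.List.len st.1))

def remove_loops_alt (path : List Int) : List Int :=
  (path.foldl bStep ([], PySem.Dict.empty)).1

-- ===== PRECONDITION & SPEC =====
def Spec_remove_loops (path : List Int) (out : List Int) : Prop := out = remove_loops_alt path
instance (path : List Int) (out : List Int) : Decidable (Spec_remove_loops path out) := by unfold Spec_remove_loops; infer_instance

-- ===== CLAIM (what is proved, stated in full; the proofs are below) =====
def Claim_equal_remove_loops : Prop := ∀ (path : List Int), Dom_remove_loops path → Spec_remove_loops path (remove_loops path)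

-- ===== LEMMAS AND PROOFS =====

-- the suffix of l strictly after the last occurrence of x (l itself if x ∉ l)
def afterLast (x : Int) : List Int → List Int
  | [] => []
  | y :: ys => if x ∈ ys then afterLast x ys else if y = x then ys else y :: ys

theorem afterLast_length_le (x : Int) (l : List Int) : (afterLast x l).length ≤ l.length := by
  induction l with
  | nil => simp [afterLast]
  | cons y ys ih =>
      simp only [afterLast]
      split_ifs <;> simp_all
      omega

theorem afterLast_of_not_mem (x : Int) (l : List Int) (h : x ∉ l) : afterLast x l = l := by
  cases l with
  | nil => rfl
  | cons y ys =>
      simp only [List.mem_cons, not_or] at h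
      simp [afterLast, h.2, Ne.symm h.1]

theorem afterLast_cons_self (x : Int) (l : List Int) : afterLast x (x :: l) = afterLast x l := by
  by_cases h : x ∈ l
  · simp [afterLast, h]
  · simp [afterLast, h, afterLast_of_not_mem x l h]

theorem afterLast_cons_ne (x y : Int) (l : List Int) (_hxy : x ≠ y) (h : x ∈ l) :
    afterLast x (y :: l) = afterLast x l := by
  simp [afterLast, h]

-- the common recursive specification: left-to-right loop erasure, jumping to the last occurrence
def lep : List Int → List Int
  | [] => []
  | x :: xs => x :: lep (afterLast x xs)
termination_by l => l.length
decreasing_by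
  have := afterLast_length_le x xs
  simp; omega

-- ---- A computes lep ----

-- the inner loop from any position e > s: cut to just after the last occurrence of r[s]
theorem aInner_spec : ∀ (fuel : Nat) (r : List Int) (s e : Nat), s < r.length → s + 1 ≤ e →
    e ≤ r.length → r.length - e ≤ fuel →
    (aInner fuel r s e).1 =
      if r.getD s 0 ∈ r.drop e then r.take s ++ r.getD s 0 :: afterLast (r.getD s 0) (r.drop e)
      else r := by
  intro fuel
  induction fuel with
  | zero =>
      intro r s e hs he1 he2 hf
      have he : e = r.length := by omega
      simp only [aInner]
      rw [if_neg (by rw [he]; simp)]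
  | succ fuel ih =>
      intro r s e hs he1 he2 hf
      simp only [aInner]
      by_cases h : e < r.length
      · rw [if_pos h]
        by_cases heq : r.getD s 0 = r.getD e 0
        · rw [if_pos heq]
          set v := r.getD s 0 with hv
          have hveq : r[e] = v := by
            rw [show v = r.getD e 0 from heq]
            exact (List.getD_eq_getElem r 0 h).symm
          have hdrop : r.drop e = v :: r.drop (e + 1) := by
            rw [List.drop_eq_getElem_cons h, hveq]
          have hlent : (r.take s).length = s := by simp [List.length_take]; omega
          have hlen' : (r.take s ++ r.drop e).length = s + (r.length - e) := by
            simp [List.length_take, List.length_drop]; omega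
          have hgd' : (r.take s ++ r.drop e).getD s 0 = v := by
            have hh : (r.take s ++ r.drop e).getD s 0 = (r.take s ++ r.drop e)[s]'(by omega) := by
              rw [List.getD_eq_getElem]
            rw [hh]
            rw [List.getElem_append_right (by omega)]
            simp [hlent, hdrop]
          have htake' : (r.take s ++ r.drop e).take s = r.take s := List.take_left' hlent
          have hdrop' : (r.take s ++ r.drop e).drop (s + 1) = r.drop (e + 1) := by
            have h1 : (r.take s ++ r.drop e).drop ((r.take s).length + 1) = (r.drop e).drop 1 :=
              List.drop_length_add_append 1
            rw [hlent] at h1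
            rw [h1, hdrop]
            simp
          have ih' := ih (r.take s ++ r.drop e) s (s + 1) (by omega) (by omega) (by omega) (by omega)
          rw [hgd', htake', hdrop'] at ih'
          rw [ih']
          have hmem : v ∈ r.drop e := by rw [hdrop]; exact List.mem_cons_self
          rw [if_pos hmem, hdrop, afterLast_cons_self]
          by_cases hm : v ∈ r.drop (e + 1)
          · rw [if_pos hm]
          · rw [if_neg hm, afterLast_of_not_mem _ _ hm, ← hdrop]
        · rw [if_neg heq]
          set v := r.getD s 0 with hv
          have hw : r[e] = r.getD e 0 := (List.getD_eq_getElem r 0 h).symm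
          have hwv : r[e] ≠ v := by rw [hw, hv]; exact fun c => heq c.symm
          have hdrop : r.drop e = r[e] :: r.drop (e + 1) := List.drop_eq_getElem_cons h
          have ih' := ih r s (e + 1) hs (by omega) (by omega) (by omega)
          rw [ih']
          by_cases hm : v ∈ r.drop (e + 1)
          · rw [if_pos hm, if_pos (by rw [hdrop]; exact List.mem_cons_of_mem _ hm),
              hdrop, afterLast_cons_ne v r[e] _ (fun c => hwv c.symm) hm]
          · rw [if_neg hm, if_neg ?_]
            rw [hdrop]
            simp only [List.mem_cons, not_or]
            exact ⟨fun c => hwv c.symm, hm⟩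
      · rw [if_neg h]
        have he : e = r.length := by omega
        rw [if_neg (by rw [he]; simp)]

theorem aInner_start (r : List Int) (s : Nat) (hs : s < r.length) :
    (aInner r.length r s s).1 =
      r.take s ++ r.getD s 0 :: afterLast (r.getD s 0) (r.drop (s + 1)) := by
  obtain ⟨m, hm⟩ : ∃ m, r.length = m + 1 := ⟨r.length - 1, by omega⟩
  rw [hm]
  simp only [aInner]
  rw [if_pos (show s < r.length by omega)]
  rw [if_pos trivial, List.take_append_drop]
  rw [aInner_spec m r s (s + 1) hs (le_refl _) (by omega) (by omega)]
  set v := r.getD s 0 with hv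
  have hdrop : r.drop s = r[s] :: r.drop (s + 1) := List.drop_eq_getElem_cons hs
  have hvs : r[s] = v := (List.getD_eq_getElem r 0 hs).symm
  by_cases hm2 : v ∈ r.drop (s + 1)
  · rw [if_pos hm2]
  · rw [if_neg hm2, afterLast_of_not_mem _ _ hm2]
    conv_lhs => rw [← List.take_append_drop s r, hdrop, hvs]

theorem aInner_stop (fuel : Nat) (r : List Int) (s : Nat) (hs : r.length ≤ s) :
    (aInner fuel r s s).1 = r := by
  cases fuel with
  | zero => rfl
  | succ fuel => simp only [aInner]; rw [if_neg (by omega)]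

theorem aOuter_spec : ∀ (fuel : Nat) (r : List Int) (s : Nat), s ≤ r.length →
    r.length + 1 - s ≤ fuel → aOuter fuel r s = r.take s ++ lep (r.drop s) := by
  intro fuel
  induction fuel with
  | zero => intro r s hle hf; omega
  | succ fuel ih =>
      intro r s hle _hf
      simp only [aOuter]
      rw [if_pos hle]
      rcases Nat.lt_or_ge s r.length with hs | hs
      · have h1 := aInner_start r s hs
        set v := r.getD s 0 with hv
        set A := afterLast v (r.drop (s + 1)) with hA
        have hlent : (r.take s).length = s := by simp [List.length_take]; omega
        have hAlen : A.length ≤ r.length - (s + 1) := by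
          rw [hA]
          refine le_trans (afterLast_length_le _ _) ?_
          simp [List.length_drop]
        have hlen1 : (aInner r.length r s s).1.length = s + 1 + A.length := by
          rw [h1]; simp [hlent]; omega
        have ih' := ih (aInner r.length r s s).1 (s + 1) (by omega) (by omega)
        rw [ih']
        rw [h1]
        have htake : (r.take s ++ v :: A).take (s + 1) = r.take s ++ [v] := by
          rw [List.take_append, hlent]
          simp [List.take_take]
        have hdrop2 : (r.take s ++ v :: A).drop (s + 1) = A := by
          have h2 : (r.take s ++ v :: A).drop ((r.take s).length + 1) = (v :: A).drop 1 :=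
            List.drop_length_add_append 1
          rw [hlent] at h2
          rw [h2]; rfl
        rw [htake, hdrop2]
        have hdrops : r.drop s = r[s] :: r.drop (s + 1) := List.drop_eq_getElem_cons hs
        have hvs : r[s] = v := (List.getD_eq_getElem r 0 hs).symm
        rw [hdrops, hvs]
        rw [show lep (v :: r.drop (s+1)) = v :: lep (afterLast v (r.drop (s+1))) from by
          rw [lep]]
        simp [hA]
      · have hs' : s = r.length := by omega
        rw [aInner_stop r.length r s (by omega)]
        have houter : aOuter fuel r (s + 1) = r := by
          cases fuel with
          | zero => rfl
          | succ fuel => simp only [aOuter]; rw [if_neg (by omega)]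
        rw [houter, hs', List.take_length, List.drop_length]
        simp [lep]

theorem A_eq_lep (path : List Int) : remove_loops path = lep path := by
  have h := aOuter_spec (path.length + 1) path 0 (by simp) (by omega)
  simpa [remove_loops] using h


-- ---- B computes lep ----

-- pure list-level step of B (what bStep does to the out component)
def step' (out : List Int) (x : Int) : List Int :=
  if x ∈ out then out.take (out.idxOf x) ++ [x] else out ++ [x]

-- invariant tying B's dictionary to its out list
def BInv (out : List Int) (idx : PySem.Dict Int Int) : Prop :=
  out.Nodup ∧ ∀ y : Int, idx.get? y = if y ∈ out then some ((out.idxOf y : Nat) : Int) else none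

-- Python `del d[k]` (PySem.Dict.erase) as seen through get?
theorem get?_erase (d : PySem.Dict Int Int) (k y : Int) :
    (d.erase k).get? y = if y = k then none else d.get? y := by
  obtain ⟨items⟩ := d
  simp only [PySem.Dict.erase, PySem.Dict.get?]
  by_cases h : y = k
  · subst h
    rw [if_pos rfl, List.find?_eq_none.2]
    · rfl
    · intro p hp
      have := List.of_mem_filter hp
      simpa using this
  · rw [if_neg h]
    congr 1
    induction items with
    | nil => rfl
    | cons p rest ih =>
        by_cases hk : p.1 = k
        · have hky : (k == y) = false := by
            simp only [beq_eq_false_iff_ne, ne_eq]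
            exact fun e => h e.symm
          simp [hk, hky, ih]
        · simp only [List.filter_cons, beq_eq_false_iff_ne, Bool.not_eq_true']
          rw [if_pos (by simpa using hk)]
          rw [List.find?_cons, List.find?_cons]
          cases hpy : (p.1 == y) with
          | true => rfl
          | false => exact ih

-- Source B's `for y in out[i:]: del idx[y]` loop, through get?
theorem get?_foldl_erase (L : List Int) (d : PySem.Dict Int Int) (y : Int) :
    (L.foldl (fun d k => d.erase k) d).get? y = if y ∈ L then none else d.get? y := by
  induction L generalizing d with
  | nil => simp
  | cons k L ih =>
      simp only [List.foldl_cons, ih, get?_erase, List.mem_cons]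
      by_cases h1 : y ∈ L <;> by_cases h2 : y = k <;> simp [h1, h2]

theorem mem_take_idxOf_lt : ∀ (l : List Int) (n : Nat) (x : Int), x ∈ l.take n → l.idxOf x < n := by
  intro l
  induction l with
  | nil => intro n x h; simp at h
  | cons y l ih =>
      intro n x h
      cases n with
      | zero => simp at h
      | succ n =>
          rcases List.mem_cons.1 (by simpa using h) with h' | h'
          · subst h'; simp [List.idxOf_cons_self]
          · by_cases hxy : x = y
            · subst hxy; simp [List.idxOf_cons_self]
            · have := ih n x h'
              rw [List.idxOf_cons_ne _ (fun e => hxy e.symm)]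
              omega

theorem not_mem_take_idxOf (l : List Int) (x : Int) : x ∉ l.take (l.idxOf x) := by
  intro h
  exact absurd (mem_take_idxOf_lt l (l.idxOf x) x h) (lt_irrefl _)

theorem idxOf_take_eq (l : List Int) (n : Nat) (y : Int) (h : y ∈ l.take n) :
    l.idxOf y = (l.take n).idxOf y := by
  conv_lhs => rw [← List.take_append_drop n l]
  exact List.idxOf_append_of_mem h

theorem disjoint_take_drop (l : List Int) (h : l.Nodup) (n : Nat) (x : Int)
    (h1 : x ∈ l.take n) (h2 : x ∈ l.drop n) : False := by
  have h3 : (l.take n ++ l.drop n).Nodup := by rw [List.take_append_drop]; exact h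
  exact (List.nodup_append.1 h3).2.2 x h1 x h2 rfl

theorem bStep_spec (out : List Int) (idx : PySem.Dict Int Int) (x : Int) (h : BInv out idx) :
    (bStep (out, idx) x).1 = step' out x ∧ BInv (bStep (out, idx) x).1 (bStep (out, idx) x).2 := by
  obtain ⟨hnd, hget⟩ := h
  by_cases hx : x ∈ out
  · set n := out.idxOf x with hn
    have hlt : n < out.length := List.idxOf_lt_length_of_mem hx
    have hgx : idx.get? x = some ((n : Nat) : Int) := by rw [hget x, if_pos hx]
    have hxt : x ∉ out.take n := not_mem_take_idxOf out x
    have hb : bStep (out, idx) x =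
        (out.take n ++ [x],
         ((out.drop n).foldl (fun d y => d.erase y) idx).insert x ((out.take n).length : Int)) := by
      simp only [bStep, hgx, PySem.List.slice_from_natCast, PySem.List.slice_to_natCast,
        PySem.List.len_eq]
    have hfst : out.take n ++ [x] = step' out x := by rw [step', if_pos hx, hn]
    refine ⟨by rw [hb, hfst], ?_⟩
    rw [hb]
    constructor
    · refine List.Nodup.append (hnd.sublist (List.take_sublist n out)) (List.nodup_singleton x) ?_
      intro a ha hb'
      rw [List.mem_singleton] at hb'
      exact hxt (hb' ▸ ha)
    · intro y
      have hlen : (out.take n).length = n := by simp [List.length_take]; omega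
      by_cases hyx : y = x
      · subst hyx
        rw [PySem.Dict.get?_insert_self, if_pos (by simp)]
        rw [List.idxOf_append_of_notMem hxt]
        simp [hlen]
      · rw [PySem.Dict.get?_insert_of_ne _ _ (hne := hyx), get?_foldl_erase]
        by_cases hyd : y ∈ out.drop n
        · rw [if_pos hyd]
          have hyt : y ∉ out.take n := fun hc => disjoint_take_drop out hnd n y hc hyd
          rw [if_neg (by simp [hyt, hyx])]
        · rw [if_neg hyd, hget y]
          by_cases hyt : y ∈ out.take n
          · have hymem : y ∈ out := List.mem_of_mem_take hyt
            rw [if_pos hymem, if_pos (by simp [hyt])]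
            rw [List.idxOf_append_of_mem hyt, ← idxOf_take_eq out n y hyt]
          · have hymem : y ∉ out := by
              intro hc
              rcases List.mem_append.1 (by rw [List.take_append_drop n out]; exact hc :
                y ∈ out.take n ++ out.drop n) with h' | h'
              · exact hyt h'
              · exact hyd h'
            rw [if_neg hymem, if_neg (by simp [hyt, hyx])]
  · have hgx : idx.get? x = none := by rw [hget x, if_neg hx]
    have hb : bStep (out, idx) x = (out ++ [x], idx.insert x (out.length : Int)) := by
      simp only [bStep, hgx, PySem.List.len_eq]
    have hfst : out ++ [x] = step' out x := by rw [step', if_neg hx]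
    refine ⟨by rw [hb, hfst], ?_⟩
    rw [hb]
    constructor
    · refine List.Nodup.append hnd (List.nodup_singleton x) ?_
      intro a ha hb'
      rw [List.mem_singleton] at hb'
      exact hx (hb' ▸ ha)
    · intro y
      by_cases hyx : y = x
      · subst hyx
        rw [PySem.Dict.get?_insert_self, if_pos (by simp)]
        rw [List.idxOf_append_of_notMem hx]
        simp
      · rw [PySem.Dict.get?_insert_of_ne _ _ (hne := hyx), hget y]
        by_cases hym : y ∈ out
        · rw [if_pos hym, if_pos (by simp [hym])]
          rw [List.idxOf_append_of_mem hym]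
        · rw [if_neg hym, if_neg (by simp [hym, hyx])]

theorem foldl_bStep_fst (l : List Int) : ∀ (out : List Int) (idx : PySem.Dict Int Int),
    BInv out idx → (l.foldl bStep (out, idx)).1 = l.foldl step' out := by
  induction l with
  | nil => intro out idx _; rfl
  | cons x l ih =>
      intro out idx h
      obtain ⟨h1, h2⟩ := bStep_spec out idx x h
      rw [List.foldl_cons, List.foldl_cons]
      have hpair : bStep (out, idx) x = (step' out x, (bStep (out, idx) x).2) := by
        rw [← h1]
      rw [hpair]
      exact ih _ _ (h1 ▸ h2)

theorem BInv_empty : BInv [] PySem.Dict.empty := by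
  constructor
  · exact List.nodup_nil
  · intro y; simp [PySem.Dict.get?_empty]

theorem mem_step' (y : Int) (out : List Int) (x : Int) (h : y ∈ step' out x) : y ∈ out ∨ y = x := by
  simp only [step'] at h
  split_ifs at h with hm
  · rcases List.mem_append.1 h with h' | h'
    · exact Or.inl (List.mem_of_mem_take h')
    · exact Or.inr (List.mem_singleton.1 h')
  · rcases List.mem_append.1 h with h' | h'
    · exact Or.inl h'
    · exact Or.inr (List.mem_singleton.1 h')

theorem step'_cons_ne (out : List Int) (x y : Int) (hxy : y ≠ x) :
    step' (x :: out) y = x :: step' out y := by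
  by_cases hm : y ∈ out
  · simp [step', hm, hxy, List.idxOf_cons_ne _ (Ne.symm hxy)]
  · simp [step', hm, hxy]

-- while x never reappears, it stays at the head of the accumulator untouched
theorem foldl_step'_head : ∀ (l : List Int) (x : Int) (out : List Int), x ∉ l → x ∉ out →
    l.foldl step' (x :: out) = x :: l.foldl step' out := by
  intro l
  induction l with
  | nil => intro x out _ _; rfl
  | cons y l ih =>
      intro x out hl hout
      simp only [List.mem_cons, not_or] at hl
      rw [List.foldl_cons, List.foldl_cons, step'_cons_ne out x y (fun e => hl.1 e.symm)]
      refine ih x (step' out y) hl.2 ?_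
      intro hmem
      rcases mem_step' x (out) y hmem with h' | h'
      · exact hout h'
      · exact hl.1 h'

-- when x does reappear, the accumulator resets to [x] at its last occurrence
theorem foldl_step'_reset : ∀ (xs : List Int) (x : Int) (out : List Int), x ∉ out → x ∈ xs →
    xs.foldl step' (x :: out) = x :: (afterLast x xs).foldl step' [] := by
  intro xs
  induction xs with
  | nil => intro x out _ h; exact absurd h (List.not_mem_nil)
  | cons y ys ih =>
      intro x out hout hx
      by_cases hyx : y = x
      · subst hyx
        have hstep : step' (y :: out) y = [y] := by
          simp [step', List.idxOf_cons_self]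
        rw [List.foldl_cons, hstep]
        by_cases hys : y ∈ ys
        · rw [afterLast_cons_self]
          have := ih y [] (List.not_mem_nil) hys
          simpa using this
        · rw [afterLast_cons_self, afterLast_of_not_mem _ _ hys]
          have := foldl_step'_head ys y [] hys (List.not_mem_nil)
          simpa using this
      · have hx' : x ∈ ys := by
          rcases List.mem_cons.1 hx with h' | h'
          · exact absurd h'.symm hyx
          · exact h'
        rw [afterLast_cons_ne x y ys (fun e => hyx e.symm) hx']
        rw [List.foldl_cons, step'_cons_ne out x y (fun e => hyx e)]
        refine ih x (step' out y) ?_ hx'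
        intro hmem
        rcases mem_step' x out y hmem with h' | h'
        · exact hout h'
        · exact hyx h'.symm

theorem lep_eq_foldl : ∀ (xs : List Int), lep xs = xs.foldl step' [] := by
  intro xs
  fun_induction lep xs with
  | case1 => rfl
  | case2 x xs ih =>
      rw [List.foldl_cons]
      have hstep : step' [] x = [x] := by simp [step']
      rw [hstep]
      by_cases hx : x ∈ xs
      · rw [foldl_step'_reset xs x [] (List.not_mem_nil) hx, ih]
      · rw [foldl_step'_head xs x [] hx (List.not_mem_nil), ih,
          afterLast_of_not_mem _ _ hx]

theorem B_eq_lep (path : List Int) : remove_loops_alt path = lep path := by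
  unfold remove_loops_alt
  rw [foldl_bStep_fst path [] PySem.Dict.empty BInv_empty, ← lep_eq_foldl]

-- ===== VERDICT (by name: the statement is the Claim_ definition above) =====
theorem remove_loops_spec : Claim_equal_remove_loops := by
  intro path _
  unfold Spec_remove_loops
  rw [A_eq_lep, B_eq_lep]
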